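-- pv_equiv track=rewrite | github.com/sethtroisi/prime-gap | misc/modulo_check.py | modulo_search
-- ===== SOURCE A (Python) =====
-- def modulo_search(p, a, l, r):
--     if l == 0:
--         return 0
--
--     #assert l < r, (p, a, l, r)
--     delta = abs(r - l)
--
--     '''
--     l_div, l_mod = divmod(l, a)
--     r_div, r_mod = divmod(r, a)
--     if l_div < r_div or l_mod == 0:
--         assert l_mod == 0 or l_mod + delta >= a, (l_mod + delta, a)
--         return l_div + (l_mod > 0)
--     assert r_mod == l_mod + delta
--     assert r_div == l_div
--     '''
--     l_div, l_mod = divmod(l - 1, a)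
--     l_mod += 1
--     r_mod = l_mod + delta
--     if r_mod >= a:
--         return l_div + 1
--
--     if 2*a > p:
--         return modulo_search(p, p - a, p - r, p - l)
--
--     new_a = a - (p % a)
--     assert 0 <= new_a < a, (a, new_a)
--     k = modulo_search(a, new_a, l_mod, r_mod)
--
--     tl = k * p + l
--     mult = (tl - 1) // a + 1
--     return mult
-- ===== SOURCE B (Python) =====
-- def modulo_search(p, a, l, r):
--     # Iterative two-phase version: a descent loop walks the reflection/reduction
--     # chain (reflections rewrite the window in place, each reduction pushes one
--     # frame), then an unwind loop pops the stack and lifts the multiplier back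
--     # up with ceiling divisions.  The window test is phrased as "does the window
--     # [l, l+width] contain a multiple of a", via the gap -l % a up to the next
--     # multiple of a, instead of A's divmod bookkeeping.
--     stack = []
--     while True:
--         if l == 0:
--             val = 0
--             break
--         width = max(l, r) - min(l, r)
--         gap = -l % a                  # distance from l up to the next multiple of a
--         if gap <= width:              # a multiple of a lies inside the window
--             val = (l - 1) // a + 1
--             break
--         if 2 * a > p:                 # reflect the window through p
--             a, l, r = p - a, p - r, p - l
--         else:                         # reduce the modulus p -> a
--             stack.append((p, a, l))
--             p, a, l, r = a, -p % a, a - gap, a - gap + width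
--     while stack:
--         p, a, l = stack.pop()
--         val = -(-(val * p + l) // a)  # ceil((val*p + l) / a)
--     return val
-- ===== Notes on version B (the rewrite author's own statement) =====
-- stated objective: alternative
-- what changed: The direct recursion with divmod bookkeeping is replaced by an iterative two-phase algorithm: a descent loop reformulates the window test as 'gap -l % a to the next multiple of a vs window width', reflections rewrite the window in place and each reduction pushes one (p,a,l) frame onto an explicit stack; a second loop then pops the stack and lifts the multiplier back up with ceiling divisions -(-(val*p+l)//a).
-- outside the precondition, e.g. on modulo_search(10, 4, 1, 2): A returns 3, B returns 3
import Mathlib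
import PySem

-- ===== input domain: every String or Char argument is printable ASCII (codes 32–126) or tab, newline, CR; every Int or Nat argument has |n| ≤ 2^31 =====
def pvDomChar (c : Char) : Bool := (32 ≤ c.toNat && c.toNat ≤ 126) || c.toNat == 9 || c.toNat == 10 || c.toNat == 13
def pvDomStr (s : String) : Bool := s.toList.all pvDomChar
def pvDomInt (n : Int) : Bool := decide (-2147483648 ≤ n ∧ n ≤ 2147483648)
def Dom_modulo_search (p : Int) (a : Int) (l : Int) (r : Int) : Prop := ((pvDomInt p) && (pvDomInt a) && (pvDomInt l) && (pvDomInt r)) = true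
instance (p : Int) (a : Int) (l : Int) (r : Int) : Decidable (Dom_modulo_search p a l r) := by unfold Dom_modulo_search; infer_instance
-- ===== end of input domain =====

-- B replaces A's direct recursion by an explicit-stack two-phase loop whose window
-- test is "gap to the next multiple of a vs window width" and whose unwind uses
-- ceiling division (alternative decomposition, same asymptotic cost).

-- ===== PORT A =====
-- literal port of A's recursion; fuel-guarded (`none` = Python raises or fuel out;
-- the fuel exceeds the recursion depth on every input admitted by Pre_modulo_search)
def msGo : Nat → Int → Int → Int → Int → Option Int
  | 0, _, _, _, _ => none
  | fuel+1, p, a, l, r =>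
    if l = 0 then some 0
    else if a = 0 then none   -- divmod(l-1, 0): ZeroDivisionError
    else
      let delta := |r - l|
      let l_div := PySem.Int.floordiv (l - 1) a
      let l_mod := PySem.Int.mod (l - 1) a + 1
      let r_mod := l_mod + delta
      if r_mod ≥ a then some (l_div + 1)
      else if 2 * a > p then msGo fuel p (p - a) (p - r) (p - l)
      else
        let new_a := a - PySem.Int.mod p a
        if 0 ≤ new_a ∧ new_a < a then
          match msGo fuel a new_a l_mod r_mod with
          | none => none
          | some k => some (PySem.Int.floordiv (k * p + l - 1) a + 1)
        else none               -- assert 0 <= new_a < a: AssertionError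

def modulo_search (p : Int) (a : Int) (l : Int) (r : Int) : Int :=
  (msGo (p.natAbs + a.natAbs + 2) p a l r).getD 0

-- ===== PORT B =====
-- descent phase of Source B: the while-True loop; pushes a frame per reduction (cons = append/pop end)
def msDescend : Nat → Int → Int → Int → Int → List (Int × Int × Int) → Option (Int × List (Int × Int × Int))
  | 0, _, _, _, _, _ => none
  | fuel+1, p, a, l, r, stack =>
    if l = 0 then some (0, stack)
    else if a = 0 then none   -- -l % 0: ZeroDivisionError
    else
      let width := max l r - min l r
      let gap := PySem.Int.mod (-l) a
      if gap ≤ width then some (PySem.Int.floordiv (l - 1) a + 1, stack)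
      else if 2 * a > p then msDescend fuel p (p - a) (p - r) (p - l) stack
      else msDescend fuel a (PySem.Int.mod (-p) a) (a - gap) (a - gap + width) ((p, a, l) :: stack)

-- unwind phase of Source B: pop the stack, lifting the multiplier with ceiling divisions
def msUnwind (val : Int) (stack : List (Int × Int × Int)) : Int :=
  stack.foldl (fun v f => -(PySem.Int.floordiv (-(v * f.1 + f.2.2)) f.2.1)) val

def modulo_search_alt (p : Int) (a : Int) (l : Int) (r : Int) : Int :=
  match msDescend (p.natAbs + a.natAbs + 2) p a l r [] with
  | none => 0
  | some (val, stack) => msUnwind val stack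

-- ===== PRECONDITION & SPEC =====
-- Pre_ admits: l = 0 (immediate return 0); any a ≠ 0 whose first window check r_mod ≥ a
-- returns immediately; and the region 0 < a < p, 0 ≤ l ≤ r < p, gcd p a = 1 on which the
-- recursion provably never hits the assert or division by zero.  It DOES exclude some
-- deep-recursion inputs outside that coprime in-range region on which A happens to return
-- (B returns the same value there): whether A's assert/termination holds there is not a
-- closed-form condition on the input.
def Pre_modulo_search (p : Int) (a : Int) (l : Int) (r : Int) : Prop :=
  l = 0
  ∨ (a ≠ 0 ∧ PySem.Int.mod (l - 1) a + 1 + |r - l| ≥ a)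
  ∨ (0 < a ∧ a < p ∧ 0 ≤ l ∧ l ≤ r ∧ r < p ∧ Int.gcd p a = 1)
instance (p : Int) (a : Int) (l : Int) (r : Int) : Decidable (Pre_modulo_search p a l r) := by
  unfold Pre_modulo_search; infer_instance

def pvWitness_modulo_search : Int × Int × Int × Int := (5, 3, 1, 2)

def Spec_modulo_search (p : Int) (a : Int) (l : Int) (r : Int) (out : Int) : Prop := out = modulo_search_alt p a l r
instance (p : Int) (a : Int) (l : Int) (r : Int) (out : Int) : Decidable (Spec_modulo_search p a l r out) := by unfold Spec_modulo_search; infer_instance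

-- ===== CLAIM (what is proved, stated in full; the proofs are below) =====
def Claim_equal_modulo_search : Prop := ∀ (p : Int) (a : Int) (l : Int) (r : Int), Dom_modulo_search p a l r → Pre_modulo_search p a l r → Spec_modulo_search p a l r (modulo_search p a l r)

-- ===== LEMMAS AND PROOFS =====

-- the gap to the next multiple of a, in terms of A's shifted remainder (0 < a)
lemma msGap (l a : Int) (ha : 0 < a) :
    PySem.Int.mod (-l) a = a - 1 - PySem.Int.mod (l - 1) a := by
  have h1 := PySem.Int.floordiv_mul_add_mod (-l) a
  have h2 := PySem.Int.floordiv_mul_add_mod (l - 1) a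
  have b1l := PySem.Int.mod_nonneg (-l) ha
  have b1r := PySem.Int.mod_lt (-l) ha
  have b2l := PySem.Int.mod_nonneg (l - 1) ha
  have b2r := PySem.Int.mod_lt (l - 1) ha
  set u := PySem.Int.mod (-l) a
  set v := PySem.Int.mod (l - 1) a
  set q1 := PySem.Int.floordiv (-l) a
  set q2 := PySem.Int.floordiv (l - 1) a
  have hsum : (q1 + q2) * a + (u + v) = -1 := by linarith [h1, h2]
  have hq : q1 + q2 = -1 := by
    by_contra hne
    rcases lt_or_gt_of_ne hne with hlt | hgt
    · have : (q1 + q2) * a ≤ -2 * a := by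
        apply mul_le_mul_of_nonneg_right (by omega) (by omega)
      nlinarith
    · have : 0 * a ≤ (q1 + q2) * a := by
        apply mul_le_mul_of_nonneg_right (by omega) (by omega)
      nlinarith
  rw [hq] at hsum; omega

-- negated modulus, when the remainder is non-zero (0 < a)
lemma msModNeg (p a : Int) (ha : 0 < a) (hne : PySem.Int.mod p a ≠ 0) :
    PySem.Int.mod (-p) a = a - PySem.Int.mod p a := by
  have h1 := PySem.Int.floordiv_mul_add_mod (-p) a
  have h2 := PySem.Int.floordiv_mul_add_mod p a
  have b1l := PySem.Int.mod_nonneg (-p) ha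
  have b1r := PySem.Int.mod_lt (-p) ha
  have b2l := PySem.Int.mod_nonneg p ha
  have b2r := PySem.Int.mod_lt p ha
  set u := PySem.Int.mod (-p) a
  set v := PySem.Int.mod p a
  set q1 := PySem.Int.floordiv (-p) a
  set q2 := PySem.Int.floordiv p a
  have hsum : (q1 + q2) * a + (u + v) = 0 := by linarith [h1, h2]
  have hv : 0 < v := lt_of_le_of_ne b2l (Ne.symm hne)
  have hq : q1 + q2 = -1 := by
    by_contra hne'
    rcases lt_or_gt_of_ne hne' with hlt | hgt
    · have : (q1 + q2) * a ≤ -2 * a := by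
        apply mul_le_mul_of_nonneg_right (by omega) (by omega)
      nlinarith
    · have : 0 * a ≤ (q1 + q2) * a := by
        apply mul_le_mul_of_nonneg_right (by omega) (by omega)
      nlinarith
  rw [hq] at hsum; omega

-- B's ceiling-division step equals A's (x-1)//a + 1 step (0 < a)
lemma msCeil (x a : Int) (ha : 0 < a) :
    -(PySem.Int.floordiv (-x) a) = PySem.Int.floordiv (x - 1) a + 1 := by
  have h := (PySem.Int.floordiv_eq_iff_of_pos ha).mp (rfl : PySem.Int.floordiv (x-1) a = _)
  rw [PySem.Int.neg_floordiv_neg_eq_iff_of_pos ha]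
  constructor
  · nlinarith [h.1]
  · nlinarith [h.2]

-- the window width in B equals A's delta
lemma msWidth (l r : Int) : max l r - min l r = |r - l| := by
  rw [max_sub_min_eq_abs, abs_sub_comm]

-- invariant of the coprime in-range region, preserved by both step kinds
def MSInv (p a l r : Int) : Prop :=
  0 < a ∧ a < p ∧ 0 ≤ l ∧ l ≤ r ∧ r < p ∧ Int.gcd p a = 1

lemma msInv_one_lt (p a l r : Int) (h : MSInv p a l r)
    (hna : ¬ (PySem.Int.mod (l - 1) a + 1 + |r - l| ≥ a)) : 1 < a := by
  obtain ⟨ha, -⟩ := h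
  have h0 := PySem.Int.mod_nonneg (l - 1) ha
  have h1 := abs_nonneg (r - l)
  omega

lemma msInv_mod_ne (p a : Int) (ha : 1 < a) (hg : Int.gcd p a = 1) :
    PySem.Int.mod p a ≠ 0 := by
  intro h
  have hd : a ∣ p := (PySem.Int.mod_eq_zero_iff_dvd p a).mp h
  have h2 : a.natAbs ∣ Int.gcd p a :=
    Int.dvd_gcd (Int.natAbs_dvd.mpr hd) (Int.natAbs_dvd.mpr dvd_rfl)
  rw [hg] at h2
  have := Nat.eq_one_of_dvd_one h2
  omega

lemma msInv_gcd_reflect (p a : Int) (hg : Int.gcd p a = 1) : Int.gcd p (p - a) = 1 := by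
  have h1 : IsCoprime (p:ℤ) a := Int.isCoprime_iff_gcd_eq_one.mpr hg
  have h3 : IsCoprime (p:ℤ) (-a + p * 1) := (h1.neg_right).add_mul_left_right 1
  have hm : p - a = -a + p * 1 := by ring
  rw [hm]; exact Int.isCoprime_iff_gcd_eq_one.mp h3

lemma msInv_gcd_reduce (p a : Int) (ha : 0 < a) (hg : Int.gcd p a = 1) :
    Int.gcd a (a - PySem.Int.mod p a) = 1 := by
  have h1 : IsCoprime (a:ℤ) p := by
    rw [Int.isCoprime_iff_gcd_eq_one, Int.gcd_comm]; exact hg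
  have h3 : IsCoprime (a:ℤ) (-p + a * (1 + p / a)) := (h1.neg_right).add_mul_left_right _
  have hm : a - PySem.Int.mod p a = -p + a * (1 + p / a) := by
    rw [PySem.Int.mod_eq_emod_of_pos ha, Int.emod_def]; ring
  rw [hm]; exact Int.isCoprime_iff_gcd_eq_one.mp h3

lemma msKey : ∀ (fuel : Nat) (p a l r : Int) (st : List (Int × Int × Int)), MSInv p a l r →
    (msDescend fuel p a l r st).map (fun vs => msUnwind vs.1 vs.2)
      = (msGo fuel p a l r).map (fun w => msUnwind w st) := by
  intro fuel
  induction fuel with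
  | zero => intro p a l r st _; rfl
  | succ n ih =>
    intro p a l r st hInv
    obtain ⟨ha, hap, hl0, hlr, hrp, hg⟩ := hInv
    have ha0 : ¬ a = 0 := by omega
    have hgap : PySem.Int.mod (-l) a = a - 1 - PySem.Int.mod (l - 1) a := msGap l a ha
    have hw : max l r - min l r = |r - l| := msWidth l r
    by_cases hl : l = 0
    · simp [msDescend, msGo, hl]
    · by_cases hge : PySem.Int.mod (l - 1) a + 1 + |r - l| ≥ a
      · have hb : PySem.Int.mod (-l) a ≤ max l r - min l r := by rw [hgap, hw]; omega
        simp [msDescend, msGo, hl, ha0, hge, hb]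
      · have hb : ¬ PySem.Int.mod (-l) a ≤ max l r - min l r := by rw [hgap, hw]; omega
        have ha1 : 1 < a := msInv_one_lt p a l r ⟨ha, hap, hl0, hlr, hrp, hg⟩ hge
        by_cases href : 2 * a > p
        · have hInv' : MSInv p (p - a) (p - r) (p - l) :=
            ⟨by omega, by omega, by omega, by omega, by omega, msInv_gcd_reflect p a hg⟩
          simpa [msDescend, msGo, hl, ha0, hge, hb, href] using
            ih p (p - a) (p - r) (p - l) st hInv'
        · have hmn := PySem.Int.mod_nonneg p ha
          have hml := PySem.Int.mod_lt p ha
          have hne := msInv_mod_ne p a ha1 hg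
          have hln := PySem.Int.mod_nonneg (l - 1) ha
          have habs := abs_nonneg (r - l)
          have hcond : 0 ≤ a - PySem.Int.mod p a ∧ a - PySem.Int.mod p a < a := by omega
          have hInv' : MSInv a (a - PySem.Int.mod p a)
              (PySem.Int.mod (l - 1) a + 1) (PySem.Int.mod (l - 1) a + 1 + |r - l|) :=
            ⟨by omega, by omega, by omega, by omega, by omega, msInv_gcd_reduce p a ha hg⟩
          have key' := ih a (a - PySem.Int.mod p a)
              (PySem.Int.mod (l - 1) a + 1) (PySem.Int.mod (l - 1) a + 1 + |r - l|)
              ((p, a, l) :: st) hInv'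
          have hargn : PySem.Int.mod (-p) a = a - PySem.Int.mod p a := msModNeg p a ha hne
          have hargl : a - PySem.Int.mod (-l) a = PySem.Int.mod (l - 1) a + 1 := by omega
          have hargr : a - PySem.Int.mod (-l) a + (max l r - min l r)
              = PySem.Int.mod (l - 1) a + 1 + |r - l| := by omega
          have hb' : ¬ PySem.Int.mod (-l) a ≤ |r - l| := by rw [← hw]; exact hb
          simp only [msDescend, msGo, if_neg hl, if_neg ha0, if_neg hge,
            if_neg href, if_pos hcond, hargn, hargl, hw, if_neg hb']
          rw [key']
          cases hk : msGo n a (a - PySem.Int.mod p a)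
              (PySem.Int.mod (l - 1) a + 1) (PySem.Int.mod (l - 1) a + 1 + |r - l|) with
          | none => simp
          | some k =>
            simp only [Option.map_some]
            congr 1
            show msUnwind k ((p, a, l) :: st) = msUnwind (PySem.Int.floordiv (k * p + l - 1) a + 1) st
            unfold msUnwind
            simp only [List.foldl_cons]
            congr 1
            have := msCeil (k * p + l) a ha
            calc -(PySem.Int.floordiv (-(k * p + l)) a)
                = PySem.Int.floordiv (k * p + l - 1) a + 1 := this

-- ===== VERDICT (by name: the statement is the Claim_ definition above) =====
theorem modulo_search_spec : Claim_equal_modulo_search := by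
  intro p a l r _ hpre
  unfold Spec_modulo_search modulo_search modulo_search_alt
  obtain ⟨m, hm⟩ : ∃ m, p.natAbs + a.natAbs + 2 = m + 1 := ⟨p.natAbs + a.natAbs + 1, rfl⟩
  rcases hpre with hl | ⟨ha0, hge⟩ | hInv
  · rw [hm]; simp [msGo, msDescend, hl, msUnwind]
  · rw [hm]
    by_cases hl : l = 0
    · simp [msGo, msDescend, hl, msUnwind]
    · have hb : PySem.Int.mod (-l) a ≤ max l r - min l r := by
        rcases lt_or_gt_of_ne ha0 with hneg | hpos
        · have := (PySem.Int.mod_neg_bounds (-l) hneg).2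
          have h2 : (0:Int) ≤ |r - l| := abs_nonneg _
          rw [msWidth]; omega
        · rw [msGap l a hpos, msWidth]; omega
      simp [msGo, msDescend, hl, ha0, hge, hb, msUnwind]
  · have key := msKey (p.natAbs + a.natAbs + 2) p a l r [] hInv
    cases hd : msDescend (p.natAbs + a.natAbs + 2) p a l r [] with
    | none =>
      rw [hd] at key
      cases hgo : msGo (p.natAbs + a.natAbs + 2) p a l r with
      | none => simp
      | some w => rw [hgo] at key; simp at key
    | some vs =>
      rw [hd] at key
      cases hgo : msGo (p.natAbs + a.natAbs + 2) p a l r with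
      | none => rw [hgo] at key; simp at key
      | some w =>
        rw [hgo] at key
        simp [msUnwind] at key
        simp [key, msUnwind]
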